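-- pv_equiv track=rewrite | github.com/nguyennampfiev/Trend-News-Notifier | src/news_agent/agents/ingestion/serpapi_search_mcp_server.py | get_source_authority
-- ===== SOURCE A (Python) =====
-- def get_source_authority(source):
--     """Rate source authority/credibility (0-5 scale)"""
--     # Major news sources get higher authority scores
--     high_authority = [
--         "reuters",
--         "ap",
--         "bbc",
--         "cnn",
--         "nytimes",
--         "washingtonpost",
--         "wsj",
--         "bloomberg",
--         "npr",
--         "abc",
--         "cbs",
--         "nbc",
--     ]
--     medium_authority = [
--         "fox",
--         "usa today",
--         "guardian",
--         "independent",
--         "time",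
--         "newsweek",
--         "politico",
--         "axios",
--     ]
--
--     source_lower = source.lower()
--
--     for auth_source in high_authority:
--         if auth_source in source_lower:
--             return 5
--
--     for auth_source in medium_authority:
--         if auth_source in source_lower:
--             return 3
--
--     return 1  # Unknown sources get low score
-- ===== SOURCE B (Python) =====
-- # Single pass over a unified keyword->score table, accumulating the max matched score.
-- _AUTHORITY_SCORES = [
--     ("reuters", 5), ("ap", 5), ("bbc", 5), ("cnn", 5), ("nytimes", 5),
--     ("washingtonpost", 5), ("wsj", 5), ("bloomberg", 5), ("npr", 5),
--     ("abc", 5), ("cbs", 5), ("nbc", 5),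
--     ("fox", 3), ("usa today", 3), ("guardian", 3), ("independent", 3),
--     ("time", 3), ("newsweek", 3), ("politico", 3), ("axios", 3),
-- ]
--
-- def get_source_authority(source):
--     """Rate source authority/credibility (0-5 scale)"""
--     source_lower = source.lower()
--     score = 1  # unknown sources get low score
--     for kw, sc in _AUTHORITY_SCORES:
--         if kw in source_lower:
--             score = max(score, sc)
--     return score
-- ===== Notes on version B (the rewrite author's own statement) =====
-- stated objective: simpler
-- what changed: Replaces A's two ordered early-return scans over separate tier lists by one accumulate-the-max pass over a single keyword-to-score table; correct because the tier scores 5>3>1 make the max agree with the priority scan.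
import Mathlib
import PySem

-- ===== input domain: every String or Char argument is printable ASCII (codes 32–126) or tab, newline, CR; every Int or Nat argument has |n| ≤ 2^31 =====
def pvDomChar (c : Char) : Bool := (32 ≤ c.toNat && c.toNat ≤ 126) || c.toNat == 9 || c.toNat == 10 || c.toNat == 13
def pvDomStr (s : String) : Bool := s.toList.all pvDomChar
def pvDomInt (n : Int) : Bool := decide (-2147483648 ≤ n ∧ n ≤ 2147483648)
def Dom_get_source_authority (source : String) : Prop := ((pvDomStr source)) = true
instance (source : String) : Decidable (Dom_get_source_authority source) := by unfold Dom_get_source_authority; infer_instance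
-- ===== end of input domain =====

-- B replaces A's two early-return scans by one max-accumulating pass over a unified keyword->score table (same return value everywhere).
-- ===== PORT A =====
def pvHigh : List String :=
  ["reuters", "ap", "bbc", "cnn", "nytimes", "washingtonpost", "wsj",
   "bloomberg", "npr", "abc", "cbs", "nbc"]

def pvMedium : List String :=
  ["fox", "usa today", "guardian", "independent", "time", "newsweek",
   "politico", "axios"]

def get_source_authority (source : String) : Int :=
  let source_lower := PySem.Str.lower source
  -- the two for-loops with early return: first match wins
  match pvHigh.find? (fun auth_source => PySem.Str.isIn auth_source source_lower) with
  | some _ => 5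
  | none =>
    match pvMedium.find? (fun auth_source => PySem.Str.isIn auth_source source_lower) with
    | some _ => 3
    | none => 1

-- ===== PORT B =====
def pvAuthorityScores : List (String × Int) :=
  [("reuters", 5), ("ap", 5), ("bbc", 5), ("cnn", 5), ("nytimes", 5),
   ("washingtonpost", 5), ("wsj", 5), ("bloomberg", 5), ("npr", 5),
   ("abc", 5), ("cbs", 5), ("nbc", 5),
   ("fox", 3), ("usa today", 3), ("guardian", 3), ("independent", 3),
   ("time", 3), ("newsweek", 3), ("politico", 3), ("axios", 3)]

def get_source_authority_alt (source : String) : Int :=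
  let source_lower := PySem.Str.lower source
  pvAuthorityScores.foldl
    (fun score p => if PySem.Str.isIn p.1 source_lower then max score p.2 else score) 1

-- ===== PRECONDITION & SPEC =====
def Spec_get_source_authority (source : String) (out : Int) : Prop := out = get_source_authority_alt source
instance (source : String) (out : Int) : Decidable (Spec_get_source_authority source out) := by unfold Spec_get_source_authority; infer_instance

-- ===== CLAIM (what is proved, stated in full; the proofs are below) =====
def Claim_equal_get_source_authority : Prop := ∀ (source : String), Dom_get_source_authority source → Spec_get_source_authority source (get_source_authority source)

-- ===== LEMMAS AND PROOFS =====
theorem pv_foldl_const_score (P : String → Bool) (s : Int) (l : List String) (a : Int) :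
    (l.map (fun k => (k, s))).foldl
      (fun score p => if P p.1 then max score p.2 else score) a
      = if l.any P then max a s else a := by
  induction l generalizing a with
  | nil => simp
  | cons k t ih =>
    simp only [List.map_cons, List.foldl_cons, List.any_cons]
    by_cases h : P k = true
    · simp [h, ih, max_assoc]
    · simp [h, ih]

theorem pv_table_split :
    pvAuthorityScores =
      pvHigh.map (fun k => (k, (5 : Int))) ++ pvMedium.map (fun k => (k, (3 : Int))) := by
  rfl

theorem pv_any_of_find?_some {l : List String} {p : String → Bool} {v : String}
    (h : l.find? p = some v) : l.any p = true := by
  rcases List.find?_eq_some_iff_getElem.mp h with ⟨hp, i, hi, hg, _⟩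
  exact List.any_eq_true.mpr ⟨l[i], List.getElem_mem hi, by rw [hg]; exact hp⟩

-- ===== VERDICT (by name: the statement is the Claim_ definition above) =====
theorem get_source_authority_spec : Claim_equal_get_source_authority := by
  intro source _
  unfold Spec_get_source_authority get_source_authority get_source_authority_alt
  rw [pv_table_split, List.foldl_append,
      pv_foldl_const_score (fun k => PySem.Str.isIn k (PySem.Str.lower source)),
      pv_foldl_const_score (fun k => PySem.Str.isIn k (PySem.Str.lower source))]
  cases hH : pvHigh.find? (fun k => PySem.Str.isIn k (PySem.Str.lower source)) with
  | some v =>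
    simp only [hH, pv_any_of_find?_some hH, if_true]
    split <;> norm_num
  | none =>
    have hHa : (pvHigh.any fun k => PySem.Str.isIn k (PySem.Str.lower source)) = false := by
      simp only [List.any_eq_false]
      intro x hx
      simpa using List.find?_eq_none.mp hH x hx
    cases hM : pvMedium.find? (fun k => PySem.Str.isIn k (PySem.Str.lower source)) with
    | some v =>
      simp only [hH, hM, hHa, pv_any_of_find?_some hM, if_true, Bool.false_eq_true, if_false]
      norm_num
    | none =>
      have hMa : (pvMedium.any fun k => PySem.Str.isIn k (PySem.Str.lower source)) = false := by
        simp only [List.any_eq_false]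
        intro x hx
        simpa using List.find?_eq_none.mp hM x hx
      simp only [hH, hM, hHa, hMa, Bool.false_eq_true, if_false]
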